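-- pv_equiv track=rewrite | github.com/MrDeox/agente_autonomo | backups/before_refactoring_20250707_214916/backup_old_structure/agent/code_metrics.py | _find_duplicates_for_block
-- ===== SOURCE A (Python) =====
-- def _find_duplicates_for_block(block_to_check: list[str], all_lines: list[tuple[int, str]], start_index: int, min_lines: int) -> list[tuple[int, int]]:
--     """Finds occurrences of block_to_check in all_lines, starting after start_index."""
--     duplicates = []
--     block_len = len(block_to_check)
--     if block_len < min_lines:
--         return []
--
--     for i in range(start_index, len(all_lines) - block_len + 1):
--         current_block_lines = [line_content for _, line_content in all_lines[i : i + block_len]]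
--         if current_block_lines == block_to_check:
--             duplicates.append((all_lines[i][0], all_lines[i + block_len - 1][0]))
--     return duplicates
-- ===== SOURCE B (Python) =====
-- def _find_duplicates_for_block(block_to_check: list[str], all_lines: list[tuple[int, str]], start_index: int, min_lines: int) -> list[tuple[int, int]]:
--     """Index-based search: build a content -> positions index in one pass, then
--     verify a window only at the indexed positions of the block's first line."""
--     m = len(block_to_check)
--     if m == 0 or m < min_lines:
--         return []
--     contents = [c for _, c in all_lines]
--     nums = [k for k, _ in all_lines]
--     index = {}
--     for j, c in enumerate(contents):
--         index[c] = index.get(c, []) + [j]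
--     result = []
--     for j in index.get(block_to_check[0], []):
--         if j >= start_index and j + m <= len(contents) and contents[j:j + m] == block_to_check:
--             result.append((nums[j], nums[j + m - 1]))
--     return result
-- ===== Notes on version B (the rewrite author's own statement) =====
-- stated objective: alternative
-- what changed: A slides over every window position and compares the whole block there; B builds a content-to-positions index of the lines in one pass and verifies a window only at the indexed positions of the block's first line.
-- intended difference: On a negative start_index whose wrapped-around slice matches a window ending before the last line, A reports that occurrence twice (once early via Python's negative slice indices, once in order) while B reports each occurrence at or after the start exactly once, which is the intended 'occurrences after start_index'. — e.g. on _find_duplicates_for_block(["a"], [(1, "a"), (2, "b")], -2, 1): A returns [(1, 1), (1, 1)], B returns [(1, 1)]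
import Mathlib
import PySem

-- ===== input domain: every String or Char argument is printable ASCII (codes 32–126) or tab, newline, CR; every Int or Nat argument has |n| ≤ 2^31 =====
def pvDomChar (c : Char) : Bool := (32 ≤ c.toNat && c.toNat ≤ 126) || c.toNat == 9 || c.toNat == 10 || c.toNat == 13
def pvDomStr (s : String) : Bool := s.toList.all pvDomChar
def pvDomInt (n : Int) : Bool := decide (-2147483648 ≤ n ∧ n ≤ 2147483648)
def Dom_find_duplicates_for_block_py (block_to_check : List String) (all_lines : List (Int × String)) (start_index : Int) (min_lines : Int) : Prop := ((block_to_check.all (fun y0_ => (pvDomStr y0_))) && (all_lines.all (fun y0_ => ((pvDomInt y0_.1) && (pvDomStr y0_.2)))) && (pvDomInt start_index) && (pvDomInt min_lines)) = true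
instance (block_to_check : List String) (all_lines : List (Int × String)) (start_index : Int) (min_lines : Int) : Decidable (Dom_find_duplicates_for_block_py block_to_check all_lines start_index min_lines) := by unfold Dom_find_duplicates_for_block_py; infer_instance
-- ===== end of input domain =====

-- B replaces A's scan of every window by a content→positions index built in one pass:
-- windows are verified only at the indexed positions of the block's first line ("alternative" objective).

-- ===== PORT A =====
-- literal port of _find_duplicates_for_block; pyGetD's default (0, "") is only reached
-- outside Pre_ (on a match both indices are in range).
def find_duplicates_for_block_py (block_to_check : List String) (all_lines : List (Int × String)) (start_index : Int) (min_lines : Int) : List (Int × Int) :=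
  let block_len : Int := block_to_check.length
  if block_len < min_lines then []
  else
    (PySem.List.pyRange start_index ((all_lines.length : Int) - block_len + 1) 1).foldl
      (fun duplicates i =>
        let current_block_lines :=
          (PySem.List.slice all_lines (some i) (some (i + block_len))).map Prod.snd
        if current_block_lines = block_to_check then
          duplicates ++ [((PySem.List.pyGetD all_lines i (0, "")).1,
                          (PySem.List.pyGetD all_lines (i + block_len - 1) (0, "")).1)]
        else duplicates) []

-- ===== PORT B =====
-- literal port of Source B: `index[c] = index.get(c, []) + [j]` is Dict.modify c [] (· ++ [j]).
def find_duplicates_for_block_py_alt (block_to_check : List String) (all_lines : List (Int × String)) (start_index : Int) (min_lines : Int) : List (Int × Int) :=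
  let m : Int := block_to_check.length
  if block_to_check.length = 0 ∨ m < min_lines then []
  else
    let contents := all_lines.map Prod.snd
    let nums := all_lines.map Prod.fst
    let index : PySem.Dict String (List Int) :=
      (PySem.List.enumerate contents).foldl (fun d p => d.modify p.2 [] (· ++ [p.1]))
        PySem.Dict.empty
    (index.getD (PySem.List.pyGetD block_to_check 0 "") []).foldl
      (fun result j =>
        if start_index ≤ j ∧ j + m ≤ (contents.length : Int) ∧
            PySem.List.slice contents (some j) (some (j + m)) = block_to_check then
          result ++ [(PySem.List.pyGetD nums j 0, PySem.List.pyGetD nums (j + m - 1) 0)]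
        else result) []

-- ===== PRECONDITION & SPEC =====
-- Pre_ excludes exactly the inputs where A raises IndexError: an empty block with
-- min_lines ≤ 0 and start_index ≤ len(all_lines) makes every position "match" and
-- A then evaluates all_lines[i] at an out-of-range i.
def Pre_find_duplicates_for_block_py (block_to_check : List String) (all_lines : List (Int × String)) (start_index : Int) (min_lines : Int) : Prop :=
  block_to_check ≠ [] ∨ (0 : Int) < min_lines ∨ (all_lines.length : Int) < start_index
instance (block_to_check : List String) (all_lines : List (Int × String)) (start_index : Int) (min_lines : Int) : Decidable (Pre_find_duplicates_for_block_py block_to_check all_lines start_index min_lines) := by unfold Pre_find_duplicates_for_block_py; infer_instance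
def pvWitness_find_duplicates_for_block_py : List String × (List (Int × String)) × Int × Int :=
  (["a"], [(1, "a")], 0, 1)

-- On a negative start_index whose wrapped-around slice matches a window ending before the
-- last line, A reports that occurrence twice (once early, via Python's negative slice
-- indices, and again in order), while B reports each occurrence exactly once, which is the
-- intended meaning of "find occurrences at or after start_index".
def D_find_duplicates_for_block_py (block_to_check : List String) (all_lines : List (Int × String)) (start_index : Int) (min_lines : Int) : Prop :=
  1 ≤ block_to_check.length ∧ min_lines ≤ (block_to_check.length : Int) ∧
    ∃ j ∈ List.range all_lines.length,
      (all_lines.length : Int) + start_index ≤ (j : Int) ∧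
      j + block_to_check.length < all_lines.length ∧
      ((all_lines.drop j).take block_to_check.length).map Prod.snd = block_to_check
instance (block_to_check : List String) (all_lines : List (Int × String)) (start_index : Int) (min_lines : Int) : Decidable (D_find_duplicates_for_block_py block_to_check all_lines start_index min_lines) := by unfold D_find_duplicates_for_block_py; infer_instance

def Spec_find_duplicates_for_block_py (block_to_check : List String) (all_lines : List (Int × String)) (start_index : Int) (min_lines : Int) (out : List (Int × Int)) : Prop := ¬ D_find_duplicates_for_block_py block_to_check all_lines start_index min_lines → out = find_duplicates_for_block_py_alt block_to_check all_lines start_index min_lines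
instance (block_to_check : List String) (all_lines : List (Int × String)) (start_index : Int) (min_lines : Int) (out : List (Int × Int)) : Decidable (Spec_find_duplicates_for_block_py block_to_check all_lines start_index min_lines out) := by unfold Spec_find_duplicates_for_block_py; infer_instance

def pvDiffWitness_find_duplicates_for_block_py : List String × (List (Int × String)) × Int × Int :=
  (["a"], [(1, "a"), (2, "b")], -2, 1)
def pvDiffWitnessOut_find_duplicates_for_block_py : (List (Int × Int)) × (List (Int × Int)) :=
  ([(1, 1), (1, 1)], [(1, 1)])

-- ===== CLAIM (what is proved, stated in full; the proofs are below) =====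
def Claim_unchanged_find_duplicates_for_block_py : Prop := ∀ (block_to_check : List String) (all_lines : List (Int × String)) (start_index : Int) (min_lines : Int), Dom_find_duplicates_for_block_py block_to_check all_lines start_index min_lines → Pre_find_duplicates_for_block_py block_to_check all_lines start_index min_lines → Spec_find_duplicates_for_block_py block_to_check all_lines start_index min_lines (find_duplicates_for_block_py block_to_check all_lines start_index min_lines)
def Claim_changed_find_duplicates_for_block_py : Prop := Dom_find_duplicates_for_block_py (pvDiffWitness_find_duplicates_for_block_py.1) (pvDiffWitness_find_duplicates_for_block_py.2.1) (pvDiffWitness_find_duplicates_for_block_py.2.2.1) (pvDiffWitness_find_duplicates_for_block_py.2.2.2) ∧ Pre_find_duplicates_for_block_py (pvDiffWitness_find_duplicates_for_block_py.1) (pvDiffWitness_find_duplicates_for_block_py.2.1) (pvDiffWitness_find_duplicates_for_block_py.2.2.1) (pvDiffWitness_find_duplicates_for_block_py.2.2.2) ∧ D_find_duplicates_for_block_py (pvDiffWitness_find_duplicates_for_block_py.1) (pvDiffWitness_find_duplicates_for_block_py.2.1) (pvDiffWitness_find_duplicates_for_block_py.2.2.1) (pvDiffWitness_find_duplicates_for_block_py.2.2.2)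 ∧ find_duplicates_for_block_py (pvDiffWitness_find_duplicates_for_block_py.1) (pvDiffWitness_find_duplicates_for_block_py.2.1) (pvDiffWitness_find_duplicates_for_block_py.2.2.1) (pvDiffWitness_find_duplicates_for_block_py.2.2.2) = pvDiffWitnessOut_find_duplicates_for_block_py.1 ∧ find_duplicates_for_block_py_alt (pvDiffWitness_find_duplicates_for_block_py.1) (pvDiffWitness_find_duplicates_for_block_py.2.1) (pvDiffWitness_find_duplicates_for_block_py.2.2.1) (pvDiffWitness_find_duplicates_for_block_py.2.2.2) = pvDiffWitnessOut_find_duplicates_for_block_py.2 ∧ pvDiffWitnessOut_find_duplicates_for_block_py.1 ≠ pvDiffWitnessOut_find_duplicates_for_block_py.2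
def Claim_exact_find_duplicates_for_block_py : Prop := ∀ (block_to_check : List String) (all_lines : List (Int × String)) (start_index : Int) (min_lines : Int), Dom_find_duplicates_for_block_py block_to_check all_lines start_index min_lines → Pre_find_duplicates_for_block_py block_to_check all_lines start_index min_lines → D_find_duplicates_for_block_py block_to_check all_lines start_index min_lines → find_duplicates_for_block_py block_to_check all_lines start_index min_lines ≠ find_duplicates_for_block_py_alt block_to_check all_lines start_index min_lines

-- ===== LEMMAS AND PROOFS =====

theorem pv_slice_map {α β : Type} (f : α → β) (xs : List α) (a? b? : Option Int) :
    PySem.List.slice (xs.map f) a? b? = (PySem.List.slice xs a? b?).map f := by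
  simp [PySem.List.slice, List.map_take, List.map_drop]

theorem pv_slice_nonneg {α : Type} (xs : List α) (i : Int) (m : Nat) (h : 0 ≤ i) :
    PySem.List.slice xs (some i) (some (i + (m : Int))) = (xs.drop i.toNat).take m := by
  simp only [PySem.List.slice, PySem.List.clampIdx]
  have h1 : ¬ i < 0 := by omega
  have h2 : ¬ i + (m : Int) < 0 := by omega
  rw [if_neg h1, if_neg h2]
  have h3 : (i + (m : Int)).toNat = i.toNat + m := by omega
  rw [h3]
  rcases le_or_gt i.toNat xs.length with hle | hgt
  · rw [min_eq_left hle]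
    have : min (i.toNat + m) xs.length - i.toNat = min m (xs.length - i.toNat) := by omega
    rw [this]
    rw [List.take_eq_take_min (i := m), List.length_drop]
  · rw [min_eq_right (by omega), min_eq_right (by omega)]
    simp [List.drop_eq_nil_of_le (le_of_lt hgt)]

theorem pv_getD_group (l : List (Int × String)) (d : PySem.Dict String (List Int)) (c : String) :
    (l.foldl (fun d p => d.modify p.2 [] (· ++ [p.1])) d).getD c []
      = d.getD c [] ++ ((l.filter (fun p => p.2 == c)).map (·.1)) := by
  induction l generalizing d with
  | nil => simp
  | cons p t ih =>
    rw [List.foldl_cons, ih]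
    rw [PySem.Dict.getD_modify]
    by_cases hc : c = p.2
    · simp [hc]
    · have : (p.2 == c) = false := by simp [Ne.symm hc]  -- hmm
      simp [this, if_neg hc]

def pvOut (al : List (Int × String)) (m : Int) (i : Int) : Int × Int :=
  ((PySem.List.pyGetD al i (0, "")).1, (PySem.List.pyGetD al (i + m - 1) (0, "")).1)

theorem pv_A_char (b : List String) (al : List (Int × String)) (s mn : Int)
    (h : ¬ ((b.length : Int) < mn)) :
    find_duplicates_for_block_py b al s mn =
      ((PySem.List.pyRange s ((al.length : Int) - b.length + 1) 1).filter
        (fun i => decide ((PySem.List.slice al (some i) (some (i + (b.length : Int)))).map Prod.snd = b))).map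
        (pvOut al b.length) := by
  unfold find_duplicates_for_block_py
  rw [if_neg h]
  show (PySem.List.pyRange s ((al.length : Int) - b.length + 1) 1).foldl
      (fun duplicates i =>
        if (PySem.List.slice al (some i) (some (i + (b.length : Int)))).map Prod.snd = b then
          duplicates ++ [pvOut al b.length i]
        else duplicates) [] = _
  rw [PySem.List.foldl_append_ite
    (fun i => (PySem.List.slice al (some i) (some (i + (b.length : Int)))).map Prod.snd = b)
    (pvOut al b.length)]
  simp


theorem pv_B_char (b : List String) (al : List (Int × String)) (s mn : Int)
    (hb : b.length ≠ 0) (h : ¬ ((b.length : Int) < mn)) :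
    find_duplicates_for_block_py_alt b al s mn =
      ((PySem.List.pyRange 0 (al.length : Int) 1).filter
        (fun i => decide (PySem.List.pyGetD (al.map Prod.snd) i "" = PySem.List.pyGetD b 0 "") &&
          decide (s ≤ i ∧ i + (b.length : Int) ≤ ((al.map Prod.snd).length : Int) ∧
            PySem.List.slice (al.map Prod.snd) (some i) (some (i + (b.length : Int))) = b))).map
        (fun i => (PySem.List.pyGetD (al.map Prod.fst) i 0,
                   PySem.List.pyGetD (al.map Prod.fst) (i + (b.length : Int) - 1) 0)) := by
  unfold find_duplicates_for_block_py_alt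
  rw [if_neg (show ¬(b.length = 0 ∨ (b.length : Int) < mn) by omega)]
  show (((PySem.List.enumerate (al.map Prod.snd)).foldl
      (fun d p => d.modify p.2 [] (· ++ [p.1])) PySem.Dict.empty).getD
        (PySem.List.pyGetD b 0 "") []).foldl
      (fun result j =>
        if s ≤ j ∧ j + (b.length : Int) ≤ ((al.map Prod.snd).length : Int) ∧
            PySem.List.slice (al.map Prod.snd) (some j) (some (j + (b.length : Int))) = b then
          result ++ [(PySem.List.pyGetD (al.map Prod.fst) j 0,
                      PySem.List.pyGetD (al.map Prod.fst) (j + (b.length : Int) - 1) 0)]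
        else result) [] = _
  rw [PySem.List.enumerate_eq_map_pyRange (al.map Prod.snd) ""]
  rw [pv_getD_group, PySem.Dict.getD_empty, List.nil_append]
  rw [List.filter_map]
  rw [PySem.List.foldl_append_ite
    (fun j => s ≤ j ∧ j + (b.length : Int) ≤ ((al.map Prod.snd).length : Int) ∧
      PySem.List.slice (al.map Prod.snd) (some j) (some (j + (b.length : Int))) = b)
    (fun j => (PySem.List.pyGetD (al.map Prod.fst) j 0,
               PySem.List.pyGetD (al.map Prod.fst) (j + (b.length : Int) - 1) 0))]
  simp only [List.nil_append, List.map_map, List.filter_map]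
  simp only [Function.comp_def, List.filter_filter, Bool.and_comm, PySem.List.len_eq, List.length_map]
  congr 1

theorem pv_pA_nonneg (b : List String) (al : List (Int × String)) (i : Int)
    (hm : 1 ≤ b.length) (h0 : 0 ≤ i) :
    ((PySem.List.slice al (some i) (some (i + (b.length : Int)))).map Prod.snd = b) ↔
      (i.toNat + b.length ≤ al.length ∧ ((al.drop i.toNat).take b.length).map Prod.snd = b) := by
  rw [pv_slice_nonneg al i b.length h0]
  constructor
  · intro hw
    refine ⟨?_, hw⟩
    have := congrArg List.length hw
    simp [List.length_take, List.length_drop] at this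
    omega
  · exact fun h => h.2

theorem pv_neg_match_D (b : List String) (al : List (Int × String)) (s i : Int)
    (hm : 1 ≤ b.length) (hi : i < 0) (hs : s ≤ i)
    (hmatch : (PySem.List.slice al (some i) (some (i + (b.length : Int)))).map Prod.snd = b) :
    ∃ j ∈ List.range al.length, (al.length : Int) + s ≤ (j : Int) ∧
      j + b.length < al.length ∧ ((al.drop j).take b.length).map Prod.snd = b := by
  have hlen : (PySem.List.slice al (some i) (some (i + (b.length : Int)))).length = b.length := by
    have := congrArg List.length hmatch
    simpa using this
  by_cases hc1 : i + (b.length : Int) < 0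
  · by_cases hc2 : (al.length : Int) + i < 0
    · -- slice too short: contradiction
      exfalso
      simp only [PySem.List.slice, PySem.List.clampIdx, if_pos hi, if_pos hc1, if_pos hc2,
        List.length_take, List.length_drop] at hlen
      split at hlen <;> omega
    · -- genuine wrapped window at j = al.length + i
      refine ⟨((al.length : Int) + i).toNat, ?_, ?_, ?_, ?_⟩
      · simp [List.mem_range]; omega
      · omega
      · omega
      · have heq : PySem.List.slice al (some i) (some (i + (b.length : Int)))
            = (al.drop ((al.length : Int) + i).toNat).take b.length := by
          simp only [PySem.List.slice, PySem.List.clampIdx, if_pos hi, if_pos hc1, if_neg hc2]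
          have h3 : ¬ (al.length : Int) + (i + (b.length : Int)) < 0 := by omega
          rw [if_neg h3]
          have h4 : ((al.length : Int) + (i + (b.length : Int))).toNat
              - ((al.length : Int) + i).toNat = b.length := by omega
          rw [h4]
        rw [heq] at hmatch
        exact hmatch
  · -- stop index clamps below b.length: contradiction
    exfalso
    simp only [PySem.List.slice, PySem.List.clampIdx, if_pos hi, if_neg hc1,
      List.length_take, List.length_drop] at hlen
    split at hlen <;> omega

def pvP (b : List String) (al : List (Int × String)) (s : Int) (i : Int) : Prop :=
  s ≤ i ∧ 0 ≤ i ∧ i.toNat + b.length ≤ al.length ∧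
    ((al.drop i.toNat).take b.length).map Prod.snd = b

theorem pv_mem_A (b : List String) (al : List (Int × String)) (s : Int) (i : Int)
    (hm : 1 ≤ b.length)
    (hnoj : ¬ ∃ j ∈ List.range al.length, (al.length : Int) + s ≤ (j : Int) ∧
      j + b.length < al.length ∧ ((al.drop j).take b.length).map Prod.snd = b) :
    (i ∈ (PySem.List.pyRange s ((al.length : Int) - b.length + 1) 1).filter
      (fun i => decide ((PySem.List.slice al (some i) (some (i + (b.length : Int)))).map Prod.snd = b)))
      ↔ pvP b al s i := by
  rw [List.mem_filter, PySem.List.mem_pyRange_one, decide_eq_true_iff]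
  constructor
  · rintro ⟨⟨hsi, hie⟩, hmatch⟩
    by_cases h0 : 0 ≤ i
    · have := (pv_pA_nonneg b al i hm h0).mp hmatch
      exact ⟨hsi, h0, this.1, this.2⟩
    · exact absurd (pv_neg_match_D b al s i hm (by omega) hsi hmatch) hnoj
  · rintro ⟨hsi, h0, hlen, hw⟩
    refine ⟨⟨hsi, by omega⟩, (pv_pA_nonneg b al i hm h0).mpr ⟨hlen, hw⟩⟩

theorem pv_mem_B (b : List String) (al : List (Int × String)) (s : Int) (i : Int)
    (hm : 1 ≤ b.length) :
    (i ∈ (PySem.List.pyRange 0 (al.length : Int) 1).filter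
      (fun i => decide (PySem.List.pyGetD (al.map Prod.snd) i "" = PySem.List.pyGetD b 0 "") &&
        decide (s ≤ i ∧ i + (b.length : Int) ≤ ((al.map Prod.snd).length : Int) ∧
          PySem.List.slice (al.map Prod.snd) (some i) (some (i + (b.length : Int))) = b)))
      ↔ pvP b al s i := by
  rw [List.mem_filter, PySem.List.mem_pyRange_one]
  simp only [Bool.and_eq_true, decide_eq_true_iff, List.length_map]
  rw [pv_slice_map]
  constructor
  · rintro ⟨⟨h0, hin⟩, _, hsi, hle, hmatch⟩
    have := (pv_pA_nonneg b al i hm h0).mp hmatch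
    exact ⟨hsi, h0, this.1, this.2⟩
  · rintro ⟨hsi, h0, hlen, hw⟩
    have hin : i < (al.length : Int) := by omega
    refine ⟨⟨h0, hin⟩, ?_, hsi, by omega, (pv_pA_nonneg b al i hm h0).mpr ⟨hlen, hw⟩⟩
    -- first line of the window equals the first line of the block
    have hb0 : 0 < b.length := hm
    have hi0 : i.toNat < al.length := by omega
    rw [PySem.List.pyGetD_eq_getElem (al.map Prod.snd) "" h0 (by simp; omega),
        PySem.List.pyGetD_eq_getElem b "" (by omega) (by omega)]
    have hwl : 0 < (((al.drop i.toNat).take b.length).map Prod.snd).length := by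
      simp [List.length_take, List.length_drop]; omega
    have h2 := List.getElem_of_eq hw (i := 0) hwl
    simp only [List.getElem_map, List.getElem_take, List.getElem_drop] at h2
    simp only [List.getElem_map, Int.toNat_zero]
    simpa using h2

theorem pv_sorted_eq (l₁ l₂ : List Int) (h1 : l₁.Pairwise (· < ·)) (h2 : l₂.Pairwise (· < ·))
    (hm : ∀ a, a ∈ l₁ ↔ a ∈ l₂) : l₁ = l₂ := by
  have hp : l₁.Perm l₂ := by
    apply List.perm_of_nodup_nodup_toFinset_eq h1.nodup h2.nodup
    ext a; simp [List.mem_toFinset, hm a]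
  exact hp.eq_of_pairwise (fun a b _ _ hab hba => by omega) h1 h2

theorem pv_out_eq (al : List (Int × String)) (m : Int) :
    (fun i => (PySem.List.pyGetD (al.map Prod.fst) i 0,
               PySem.List.pyGetD (al.map Prod.fst) (i + m - 1) 0)) = pvOut al m := by
  funext i
  have h1 := PySem.List.pyGetD_map Prod.fst al i ((0 : Int), "")
  have h2 := PySem.List.pyGetD_map Prod.fst al (i + m - 1) ((0 : Int), "")
  simp only [] at h1 h2
  simp [pvOut, h1, h2]

theorem pv_main (b : List String) (al : List (Int × String)) (s mn : Int)
    (hm : 1 ≤ b.length) (hmn : ¬ ((b.length : Int) < mn))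
    (hnoj : ¬ ∃ j ∈ List.range al.length, (al.length : Int) + s ≤ (j : Int) ∧
      j + b.length < al.length ∧ ((al.drop j).take b.length).map Prod.snd = b) :
    find_duplicates_for_block_py b al s mn = find_duplicates_for_block_py_alt b al s mn := by
  rw [pv_A_char b al s mn hmn, pv_B_char b al s mn (by omega) hmn]
  rw [pv_out_eq]
  congr 1
  apply pv_sorted_eq
  · exact (PySem.List.pairwise_lt_pyRange_one _ _).filter _
  · exact (PySem.List.pairwise_lt_pyRange_one _ _).filter _
  · intro i
    rw [pv_mem_A b al s i hm hnoj, pv_mem_B b al s i hm]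

theorem pv_P_mem_A (b : List String) (al : List (Int × String)) (s : Int) (i : Int)
    (hm : 1 ≤ b.length) (hP : pvP b al s i) :
    i ∈ (PySem.List.pyRange s ((al.length : Int) - b.length + 1) 1).filter
      (fun i => decide ((PySem.List.slice al (some i) (some (i + (b.length : Int)))).map Prod.snd = b)) := by
  obtain ⟨hsi, h0, hlen, hw⟩ := hP
  rw [List.mem_filter, PySem.List.mem_pyRange_one, decide_eq_true_iff]
  exact ⟨⟨hsi, by omega⟩, (pv_pA_nonneg b al i hm h0).mpr ⟨hlen, hw⟩⟩

theorem pv_slice_neg (al : List (Int × String)) (j m : Nat) (hm : 1 ≤ m) (hj : j + m < al.length) :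
    PySem.List.slice al (some ((j : Int) - al.length)) (some ((j : Int) - al.length + m))
      = (al.drop j).take m := by
  simp only [PySem.List.slice, PySem.List.clampIdx]
  rw [if_pos (by omega : (j : Int) - al.length < 0)]
  rw [if_neg (by omega : ¬ (al.length : Int) + ((j : Int) - al.length) < 0)]
  rw [if_pos (by omega : (j : Int) - al.length + m < 0)]
  rw [if_neg (by omega : ¬ (al.length : Int) + ((j : Int) - al.length + m) < 0)]
  have h1 : ((al.length : Int) + ((j : Int) - al.length)).toNat = j := by omega
  have h2 : ((al.length : Int) + ((j : Int) - al.length + m)).toNat - j = m := by omega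
  rw [h1, h2]

theorem pv_tight (b : List String) (al : List (Int × String)) (s mn : Int)
    (hm : 1 ≤ b.length) (hmn : ¬ ((b.length : Int) < mn))
    (j0 : Nat) (hj0r : j0 < al.length) (hj0s : (al.length : Int) + s ≤ (j0 : Int))
    (hj0m : j0 + b.length < al.length)
    (hj0w : ((al.drop j0).take b.length).map Prod.snd = b) :
    find_duplicates_for_block_py b al s mn ≠ find_duplicates_for_block_py_alt b al s mn := by
  rw [pv_A_char b al s mn hmn, pv_B_char b al s mn (by omega) hmn, pv_out_eq]
  set l1 := (PySem.List.pyRange s ((al.length : Int) - b.length + 1) 1).filter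
      (fun i => decide ((PySem.List.slice al (some i) (some (i + (b.length : Int)))).map Prod.snd = b)) with hl1
  set l2 := (PySem.List.pyRange 0 (al.length : Int) 1).filter
      (fun i => decide (PySem.List.pyGetD (al.map Prod.snd) i "" = PySem.List.pyGetD b 0 "") &&
        decide (s ≤ i ∧ i + (b.length : Int) ≤ ((al.map Prod.snd).length : Int) ∧
          PySem.List.slice (al.map Prod.snd) (some i) (some (i + (b.length : Int))) = b)) with hl2
  have hnd1 : l1.Nodup := ((PySem.List.pairwise_lt_pyRange_one _ _).filter _).nodup
  have hnd2 : l2.Nodup := ((PySem.List.pairwise_lt_pyRange_one _ _).filter _).nodup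
  have hsub : ∀ i, i ∈ l2 → i ∈ l1 := by
    intro i hi
    exact pv_P_mem_A b al s i hm ((pv_mem_B b al s i hm).mp hi)
  have hi0 : ((j0 : Int) - al.length) ∈ l1 := by
    rw [hl1, List.mem_filter, PySem.List.mem_pyRange_one, decide_eq_true_iff]
    refine ⟨⟨by omega, by omega⟩, ?_⟩
    rw [pv_slice_neg al j0 b.length hm hj0m]
    exact hj0w
  have hi0n : ((j0 : Int) - al.length) ∉ l2 := by
    intro hmem
    have := (pv_mem_B b al s _ hm).mp hmem
    have h0 := this.2.1
    omega
  have hcard : l2.length + 1 ≤ l1.length := by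
    have h1 : insert ((j0 : Int) - al.length) l2.toFinset ⊆ l1.toFinset := by
      intro x hx
      rcases Finset.mem_insert.mp hx with h | h
      · subst h; exact List.mem_toFinset.mpr hi0
      · exact List.mem_toFinset.mpr (hsub x (List.mem_toFinset.mp h))
    have h2 := Finset.card_le_card h1
    rw [Finset.card_insert_of_notMem (by simp [List.mem_toFinset, hi0n])] at h2
    rw [List.toFinset_card_of_nodup hnd1, List.toFinset_card_of_nodup hnd2] at h2
    omega
  intro heq
  have := congrArg List.length heq
  simp only [List.length_map] at this
  omega

-- ===== VERDICT =====
theorem find_duplicates_for_block_py_spec : Claim_unchanged_find_duplicates_for_block_py := by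
  intro b al s mn _ hpre hnd
  by_cases hmn : (b.length : Int) < mn
  · unfold find_duplicates_for_block_py find_duplicates_for_block_py_alt
    rw [if_pos hmn, if_pos (Or.inr hmn)]
  · by_cases hb : b.length = 0
    · have hs : (al.length : Int) < s := by
        rcases hpre with h | h | h
        · exact absurd (List.length_eq_zero_iff.mp hb) h
        · omega
        · exact h
      unfold find_duplicates_for_block_py find_duplicates_for_block_py_alt
      rw [if_neg hmn, if_pos (Or.inl hb)]
      rw [show ((b.length : Int)) = 0 by omega]
      rw [PySem.List.pyRange_one_eq_nil (by omega)]
      simp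
    · have hm : 1 ≤ b.length := by omega
      apply pv_main b al s mn hm hmn
      intro hex
      exact hnd ⟨hm, by omega, hex⟩

theorem find_duplicates_for_block_py_tight : Claim_exact_find_duplicates_for_block_py := by
  intro b al s mn _ _ hd
  obtain ⟨hm, hmn, j0, hj0r, hj0s, hj0m, hj0w⟩ := hd
  exact pv_tight b al s mn hm (by omega) j0 (List.mem_range.mp hj0r) hj0s hj0m hj0w

theorem find_duplicates_for_block_py_changed : Claim_changed_find_duplicates_for_block_py := by
  unfold Claim_changed_find_duplicates_for_block_py; decide
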